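-- pv_equiv track=rewrite | github.com/x6nux/zed-globalization | src/zedl10n/batch.py | _build_context_regions
-- ===== SOURCE A (Python) =====
-- def _build_context_regions(
--     lines: list[str],
--     hit_lines: set[int],
--     ctx: int,
-- ) -> str:
--     """围绕命中行构建上下文区域，合并重叠区间"""
--     total = len(lines)
--     # 构建区间 [start, end)
--     intervals: list[tuple[int, int]] = []
--     for ln in sorted(hit_lines):
--         intervals.append((max(0, ln - ctx), min(total, ln + ctx + 1)))
--
--     # 合并重叠区间
--     merged: list[tuple[int, int]] = []
--     for start, end in intervals:
--         if merged and start <= merged[-1][1]: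
--             merged[-1] = (merged[-1][0], max(merged[-1][1], end))
--         else:
--             merged.append((start, end))
--
--     # 拼接各区域
--     parts: list[str] = []
--     for i, (start, end) in enumerate(merged):
--         if i == 0 and start > 0:
--             parts.append(f"// ... (省略第 1-{start} 行)")
--         elif i > 0:
--             prev_end = merged[i - 1][1]
--             parts.append(f"// ... (省略第 {prev_end + 1}-{start} 行)")
--         parts.append("\n".join(lines[start:end]))
--     if merged[-1][1] < total:
--         parts.append(f"// ... (省略第 {merged[-1][1] + 1}-{total} 行)")
--
--     return "\n".join(parts)
-- ===== SOURCE B (Python) =====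
-- def _flush(lines, total, ctx, rparts, next_start, low, high):
--     """Emit (in reverse document order) the gap/tail message and the body for the
--     group of hits spanning [low, high]; return the group's region start."""
--     s = max(0, low - ctx)
--     e = min(total, high + ctx + 1)
--     if next_start is None:
--         if e < total:
--             rparts.append(f"// ... (省略第 {e + 1}-{total} 行)")
--     else:
--         rparts.append(f"// ... (省略第 {e + 1}-{next_start} 行)")
--     rparts.append("\n".join(lines[s:e]))
--     return s
--
--
-- def _build_context_regions(
--     lines: list[str],
--     hit_lines: set[int],
--     ctx: int,
-- ) -> str:
--     """Single descending pass: walk the hits from the largest down, emitting the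
--     output pieces back-to-front as each group of chained hits closes, then
--     reverse once at the end (no interval list, no merge pass)."""
--     total = len(lines)
--     rparts: list[str] = []
--     next_start = None
--     low = high = None
--     for ln in sorted(hit_lines, reverse=True):
--         if high is None:
--             low = high = ln
--         elif max(0, low - ctx) > min(total, ln + ctx + 1):
--             next_start = _flush(lines, total, ctx, rparts, next_start, low, high)
--             low = high = ln
--         else:
--             low = ln
--     # leftmost group; low is None exactly on an empty hit set (A raises there too)
--     s = _flush(lines, total, ctx, rparts, next_start, low, high)
--     if s > 0:
--         rparts.append(f"// ... (省略第 1-{s} 行)")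
--     return "\n".join(reversed(rparts))
-- ===== Notes on version B (the rewrite author's own statement) =====
-- stated objective: alternative
-- what changed: B sorts the hits descending and emits the output pieces back-to-front in a single pass (flushing each group of chained hits as soon as the chain breaks, then reversing once), instead of A's ascending sort + per-hit interval list + overlap-merge pass + enumerate/back-index render pass; empty hit_lines stays outside Pre_ because A raises IndexError there (B raises too).
import Mathlib
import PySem

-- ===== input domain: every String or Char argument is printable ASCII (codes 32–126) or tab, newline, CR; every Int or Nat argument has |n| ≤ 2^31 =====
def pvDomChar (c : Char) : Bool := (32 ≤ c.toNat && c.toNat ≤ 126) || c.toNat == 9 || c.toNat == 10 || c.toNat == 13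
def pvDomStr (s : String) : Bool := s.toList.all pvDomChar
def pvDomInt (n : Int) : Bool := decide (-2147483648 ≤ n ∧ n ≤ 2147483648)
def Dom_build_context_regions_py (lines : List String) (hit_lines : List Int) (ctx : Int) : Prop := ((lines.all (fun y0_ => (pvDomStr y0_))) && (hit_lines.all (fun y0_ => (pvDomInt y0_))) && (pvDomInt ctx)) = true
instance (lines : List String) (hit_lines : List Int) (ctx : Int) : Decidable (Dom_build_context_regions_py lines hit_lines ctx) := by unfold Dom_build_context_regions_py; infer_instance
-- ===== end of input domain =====

-- B sorts the hits DESCENDING and emits the output pieces back-to-front in one pass (flushing a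
-- group as soon as the chain breaks), reversing once at the end — no interval list, no merge pass,
-- no enumerate/back-index render loop ('alternative'). Pre_ excludes only the empty hit set, where
-- A raises IndexError (B raises TypeError there).


-- shared: the f-string "// ... (省略第 {a}-{b} 行)"
def pvMsg (a b : Int) : String :=
  "// ... (省略第 " ++ PySem.Int.toStr a ++ "-" ++ PySem.Int.toStr b ++ " 行)"

-- ===== PORT A =====
-- merge loop body: `if merged and start <= merged[-1][1]: … else: merged.append(…)`
def pvMergeStep (merged : List (Int × Int)) (se : Int × Int) : List (Int × Int) :=
  match merged.getLast? with
  | some last =>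
      if se.1 ≤ last.2 then merged.dropLast ++ [(last.1, max last.2 se.2)]
      else merged ++ [se]
  | none => merged ++ [se]

-- parts loop body: `for i, (start, end) in enumerate(merged)`, reading merged[i-1][1] when i > 0
def pvPartsStep (lines : List String) (merged : List (Int × Int))
    (parts : List String) (p : Int × (Int × Int)) : List String :=
  let i := p.1
  let start := p.2.1
  let e := p.2.2
  let parts :=
    if i = 0 ∧ start > 0 then parts ++ [pvMsg 1 start]
    else if i > 0 then
      -- merged[i-1][1]; the index is always in range on this branch (getD default never read)
      parts ++ [pvMsg ((((PySem.List.pyGet? merged (i - 1)).getD (0, 0)).2) + 1) start]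
    else parts
  parts ++ [PySem.Str.join "\n" (PySem.List.slice lines (some start) (some e))]

def build_context_regions_py (lines : List String) (hit_lines : List Int) (ctx : Int) : String :=
  let total : Int := lines.length
  let intervals := (PySem.List.sorted hit_lines id).map
    (fun ln => (max 0 (ln - ctx), min total (ln + ctx + 1)))
  let merged := intervals.foldl pvMergeStep []
  let parts := (PySem.List.enumerate merged).foldl (pvPartsStep lines merged) []
  match PySem.List.pyGet? merged (-1) with   -- merged[-1]: IndexError (none) iff hit_lines = []
  | some last =>
      let parts := if last.2 < total then parts ++ [pvMsg (last.2 + 1) total] else parts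
      PySem.Str.join "\n" parts
  | none => ""  -- unreachable under Pre_: Python raises IndexError here

-- ===== PORT B =====
-- helper `_flush`: emit (in reverse document order) the gap/tail message and the body for the
-- group of hits spanning [low, high]; return the group's region start
def pvFlush (lines : List String) (total ctx : Int) (rparts : List String)
    (next_start : Option Int) (low high : Int) : List String × Int :=
  let s := max 0 (low - ctx)
  let e := min total (high + ctx + 1)
  let rparts :=
    match next_start with
    | none => if e < total then rparts ++ [pvMsg (e + 1) total] else rparts
    | some ns => rparts ++ [pvMsg (e + 1) ns]
  (rparts ++ [PySem.Str.join "\n" (PySem.List.slice lines (some s) (some e))], s)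

-- descending loop body: state (rparts, next_start, current group as (low, high); none = no group yet)
def pvRevStep (lines : List String) (total ctx : Int)
    (st : List String × Option Int × Option (Int × Int)) (ln : Int) :
    List String × Option Int × Option (Int × Int) :=
  match st.2.2 with
  | none => (st.1, st.2.1, some (ln, ln))
  | some lh =>
      if max 0 (lh.1 - ctx) > min total (ln + ctx + 1) then
        let fl := pvFlush lines total ctx st.1 st.2.1 lh.1 lh.2
        (fl.1, some fl.2, some (ln, ln))
      else (st.1, st.2.1, some (ln, lh.2))

def build_context_regions_py_alt (lines : List String) (hit_lines : List Int) (ctx : Int) : String :=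
  let total : Int := lines.length
  let st := (PySem.List.sorted hit_lines id true).foldl (pvRevStep lines total ctx) ([], none, none)
  match st.2.2 with
  | some lh =>
      let fl := pvFlush lines total ctx st.1 st.2.1 lh.1 lh.2
      let rparts := if fl.2 > 0 then fl.1 ++ [pvMsg 1 fl.2] else fl.1
      PySem.Str.join "\n" rparts.reverse
  | none => ""  -- Python raises TypeError here (empty hit set); outside Pre_

-- ===== PRECONDITION & SPEC =====
-- Pre_ excludes exactly the empty hit set, where A raises IndexError at merged[-1].
def Pre_build_context_regions_py (lines : List String) (hit_lines : List Int) (ctx : Int) : Prop :=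
  hit_lines ≠ []
instance (lines : List String) (hit_lines : List Int) (ctx : Int) : Decidable (Pre_build_context_regions_py lines hit_lines ctx) := by unfold Pre_build_context_regions_py; infer_instance

def pvWitness_build_context_regions_py : List String × List Int × Int := (["a", "b", "c"], [1], 0)

def Spec_build_context_regions_py (lines : List String) (hit_lines : List Int) (ctx : Int) (out : String) : Prop := out = build_context_regions_py_alt lines hit_lines ctx
instance (lines : List String) (hit_lines : List Int) (ctx : Int) (out : String) : Decidable (Spec_build_context_regions_py lines hit_lines ctx out) := by unfold Spec_build_context_regions_py; infer_instance

-- ===== CLAIM (what is proved, stated in full; the proofs are below) =====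
def Claim_equal_build_context_regions_py : Prop := ∀ (lines : List String) (hit_lines : List Int) (ctx : Int), Dom_build_context_regions_py lines hit_lines ctx → Pre_build_context_regions_py lines hit_lines ctx → Spec_build_context_regions_py lines hit_lines ctx (build_context_regions_py lines hit_lines ctx)

-- ===== LEMMAS AND PROOFS =====

-- the clamped context window of one hit
def pvIv (total ctx : Int) (ln : Int) : Int × Int := (max 0 (ln - ctx), min total (ln + ctx + 1))

-- A's merge loop, written as structural recursion on the remaining intervals
def pvGo (cur : Int × Int) : List (Int × Int) → List (Int × Int)
  | [] => [cur]
  | y :: t => if y.1 ≤ cur.2 then pvGo (cur.1, max cur.2 y.2) t else cur :: pvGo y t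

-- the largest hit chained (by consecutive window overlap) to the group starting at h
def pvHmax (total ctx : Int) (h : Int) : List Int → Int
  | [] => h
  | y :: t => if max 0 (y - ctx) ≤ min total (h + ctx + 1) then pvHmax total ctx y t else h

def pvBody (lines : List String) (se : Int × Int) : String :=
  PySem.Str.join "\n" (PySem.List.slice lines (some se.1) (some se.2))

-- document parts after a region that ended at pe (gap message, body, …, final tail message)
def pvDocAfter (lines : List String) (total : Int) (pe : Int) : List (Int × Int) → List String
  | [] => if pe < total then [pvMsg (pe + 1) total] else []
  | se :: M' => pvMsg (pe + 1) se.1 :: pvBody lines se :: pvDocAfter lines total se.2 M'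

-- document parts from a region list (without the leading header message)
def pvDocFrom (lines : List String) (total : Int) : List (Int × Int) → List String
  | [] => []
  | se :: M' => pvBody lines se :: pvDocAfter lines total se.2 M'

def pvLastEnd (pe : Int) : List (Int × Int) → Int
  | [] => pe
  | se :: M' => pvLastEnd se.2 M'

-- render loop state for the A-side proof: (parts, prev_end)
def pvRenderStep (lines : List String) (acc : List String × Option Int) (se : Int × Int) :
    List String × Option Int :=
  let parts :=
    match acc.2 with
    | none => if se.1 > 0 then acc.1 ++ [pvMsg 1 se.1] else acc.1
    | some pe => acc.1 ++ [pvMsg (pe + 1) se.1]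
  (parts ++ [PySem.Str.join "\n" (PySem.List.slice lines (some se.1) (some se.2))], some se.2)

-- A's fold is pvGo once a first group is open
lemma pv_foldA : ∀ (rest P : List (Int × Int)) (cur : Int × Int),
    List.foldl pvMergeStep (P ++ [cur]) rest = P ++ pvGo cur rest := by
  intro rest
  induction rest with
  | nil => intro P cur; rfl
  | cons y t ih =>
    intro P cur
    rw [List.foldl_cons]
    have hstep : pvMergeStep (P ++ [cur]) y =
        if y.1 ≤ cur.2 then P ++ [(cur.1, max cur.2 y.2)] else (P ++ [cur]) ++ [y] := by
      simp [pvMergeStep]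
    rw [hstep]
    by_cases hc : y.1 ≤ cur.2
    · rw [if_pos hc, ih P (cur.1, max cur.2 y.2)]
      show _ = P ++ pvGo cur (y :: t)
      rw [pvGo, if_pos hc]
    · rw [if_neg hc, ih (P ++ [cur]) y]
      show _ = P ++ pvGo cur (y :: t)
      rw [pvGo, if_neg hc, List.append_assoc, List.singleton_append]

-- pvGo's head keeps the start it was given; end and tail do not depend on the start
lemma pv_go_shape : ∀ (t : List (Int × Int)) (E : Int),
    ∃ e1 M', ∀ s', pvGo (s', E) t = (s', e1) :: M' := by
  intro t
  induction t with
  | nil => intro E; exact ⟨E, [], fun s' => rfl⟩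
  | cons y t ih =>
    intro E
    by_cases hc : y.1 ≤ E
    · obtain ⟨e1, M', h⟩ := ih (max E y.2)
      exact ⟨e1, M', fun s' => by rw [pvGo, if_pos hc]; exact h s'⟩
    · exact ⟨E, pvGo y t, fun s' => by rw [pvGo, if_neg hc]⟩

-- the prev_end render fold produces the document parts (with the final tail message)
lemma pv_render_doc (lines : List String) (total : Int) :
    ∀ (M' : List (Int × Int)) (parts : List String) (pe : Int),
    (M'.foldl (pvRenderStep lines) (parts, some pe)).1
      ++ (if pvLastEnd pe M' < total then [pvMsg (pvLastEnd pe M' + 1) total] else [])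
    = parts ++ pvDocAfter lines total pe M' := by
  intro M'
  induction M' with
  | nil => intro parts pe; rw [List.foldl_nil, pvLastEnd, pvDocAfter]
  | cons se M'' ih =>
    intro parts pe
    rw [List.foldl_cons,
      show pvRenderStep lines (parts, some pe) se =
        ((parts ++ [pvMsg (pe + 1) se.1]) ++ [pvBody lines se], some se.2) from rfl,
      pvLastEnd, pvDocAfter, ih]
    simp

-- the last end of a nonempty region list
lemma pv_getLast_end : ∀ (M' : List (Int × Int)) (se : Int × Int),
    ∃ g, (se :: M').getLast? = some g ∧ g.2 = pvLastEnd se.2 M' := by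
  intro M'
  induction M' with
  | nil => intro se; exact ⟨se, rfl, rfl⟩
  | cons y M'' ih =>
    intro se
    obtain ⟨g, hg, he⟩ := ih y
    exact ⟨g, by rw [List.getLast?_cons_cons]; exact hg, he⟩

-- flushing a group appends its (reversed) document pieces
lemma pv_flush_doc (lines : List String) (total ctx : Int) (M' : List (Int × Int)) (low high : Int) :
    pvFlush lines total ctx ((pvDocFrom lines total M').reverse) (M'.head?.map Prod.fst) low high
      = ((pvDocFrom lines total ((max 0 (low - ctx), min total (high + ctx + 1)) :: M')).reverse,
         max 0 (low - ctx)) := by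
  cases M' with
  | nil =>
    by_cases he : min total (high + ctx + 1) < total <;>
      simp [pvFlush, pvDocFrom, pvDocAfter, pvBody, he]
  | cons se M'' =>
    simp [pvFlush, pvDocFrom, pvDocAfter, pvBody]

-- the descending single pass, after k hits, holds the open leftmost group and the reversed
-- document pieces of everything to its right
lemma pv_B_inv (lines : List String) (total ctx : Int) :
    ∀ (t : List Int) (h : Int), (h :: t).Pairwise (· ≤ ·) →
    (List.foldr (fun x st => pvRevStep lines total ctx st x) ([], none, none) (h :: t)
      = ((pvDocFrom lines total (pvGo (pvIv total ctx h) (t.map (pvIv total ctx))).tail).reverse,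
         (pvGo (pvIv total ctx h) (t.map (pvIv total ctx))).tail.head?.map Prod.fst,
         some (h, pvHmax total ctx h t)))
    ∧ (pvGo (pvIv total ctx h) (t.map (pvIv total ctx))).head?
        = some ((pvIv total ctx h).1, (pvIv total ctx (pvHmax total ctx h t)).2) := by
  intro t
  induction t with
  | nil =>
    intro h _
    constructor
    · rfl
    · rfl
  | cons h' t' ih =>
    intro h hp
    have hle : h ≤ h' := (List.pairwise_cons.mp hp).1 h' (List.mem_cons_self ..)
    obtain ⟨ihst, ihhead⟩ := ih h' (List.pairwise_cons.mp hp).2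
    rw [List.foldr_cons, ihst]
    by_cases hc : max 0 (h' - ctx) > min total (h + ctx + 1)
    · -- break: flush the group starting at h'
      obtain ⟨mhd, M', hM⟩ : ∃ mhd M',
          pvGo (pvIv total ctx h') (t'.map (pvIv total ctx)) = mhd :: M' := by
        cases hM : pvGo (pvIv total ctx h') (t'.map (pvIv total ctx)) with
        | nil => rw [hM] at ihhead; exact absurd ihhead (by simp)
        | cons a b => exact ⟨a, b, rfl⟩
      have hmhd : mhd = ((pvIv total ctx h').1, (pvIv total ctx (pvHmax total ctx h' t')).2) := by
        rw [hM] at ihhead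
        simpa using ihhead
      have hgo : pvGo (pvIv total ctx h) ((h' :: t').map (pvIv total ctx))
          = pvIv total ctx h :: (mhd :: M') := by
        rw [List.map_cons, pvGo, if_neg (by simp only [pvIv]; omega), hM]
      have hHm : pvHmax total ctx h (h' :: t') = h := by
        rw [pvHmax, if_neg (by omega)]
      have hstep : pvRevStep lines total ctx
          ((pvDocFrom lines total M').reverse, M'.head?.map Prod.fst,
            some (h', pvHmax total ctx h' t')) h
          = ((pvDocFrom lines total (mhd :: M')).reverse, some mhd.1, some (h, h)) := by
        show (if max 0 (h' - ctx) > min total (h + ctx + 1) then _ else _) = _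
        rw [if_pos hc, pv_flush_doc lines total ctx M' h' (pvHmax total ctx h' t'), hmhd]
        simp [pvIv]
      constructor
      · rw [hM, hgo, hHm]
        simp only [List.tail_cons, List.head?_cons, Option.map_some]
        exact hstep
      · rw [hgo, hHm]
        rfl
    · -- fuse: h joins the group starting at h'
      obtain ⟨e1, M', hsh⟩ := pv_go_shape (t'.map (pvIv total ctx)) ((pvIv total ctx h').2)
      have hMt : pvGo (pvIv total ctx h') (t'.map (pvIv total ctx))
          = ((pvIv total ctx h').1, e1) :: M' := hsh (pvIv total ctx h').1
      have hmax : max (pvIv total ctx h).2 (pvIv total ctx h').2 = (pvIv total ctx h').2 := by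
        simp only [pvIv]
        omega
      have hgo : pvGo (pvIv total ctx h) ((h' :: t').map (pvIv total ctx))
          = ((pvIv total ctx h).1, e1) :: M' := by
        rw [List.map_cons, pvGo, if_pos (by simp only [pvIv]; omega), hmax]
        exact hsh (pvIv total ctx h).1
      have hHm : pvHmax total ctx h (h' :: t') = pvHmax total ctx h' t' := by
        rw [pvHmax, if_pos (by omega)]
      have he1 : e1 = (pvIv total ctx (pvHmax total ctx h' t')).2 := by
        have h5 := ihhead
        rw [hMt] at h5
        exact congrArg Prod.snd (Option.some_inj.mp h5)
      have hstep : pvRevStep lines total ctx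
          ((pvDocFrom lines total M').reverse, M'.head?.map Prod.fst,
            some (h', pvHmax total ctx h' t')) h
          = ((pvDocFrom lines total M').reverse, M'.head?.map Prod.fst,
            some (h, pvHmax total ctx h' t')) := by
        show (if max 0 (h' - ctx) > min total (h + ctx + 1) then _ else _) = _
        rw [if_neg hc]
      constructor
      · rw [hMt, hgo, hHm]
        simp only [List.tail_cons]
        exact hstep
      · rw [hgo, hHm, ← he1]
        rfl

-- descending sort is the reverse of the ascending sort (total order on Int)
lemma pv_sorted_rev (xs : List Int) :
    PySem.List.sorted xs id true = (PySem.List.sorted xs id).reverse := by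
  refine List.Perm.eq_of_pairwise (le := fun a b : Int => b ≤ a)
    (fun a b _ _ h1 h2 => le_antisymm h2 h1) ?_ ?_
    ((PySem.List.sorted_perm xs id true).trans
      ((PySem.List.sorted_perm xs id false).symm.trans (List.reverse_perm _).symm))
  · have := PySem.List.sorted_pairwise_rev xs id
    simpa [id] using this
  · rw [List.pairwise_reverse]
    have := PySem.List.sorted_pairwise xs id
    simpa [id] using this

-- A's enumerate/back-index parts loop equals the prev_end-tracking render fold (first component)
lemma pv_parts_eq (lines : List String) :
    ∀ (suf pre : List (Int × Int)) (parts : List String),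
      (PySem.List.enumerate suf (pre.length : Int)).foldl (pvPartsStep lines (pre ++ suf)) parts
        = (suf.foldl (pvRenderStep lines) (parts, pre.getLast?.map Prod.snd)).1 := by
  intro suf
  induction suf with
  | nil => intro pre parts; simp [PySem.List.enumerate]
  | cons se suf ih =>
    intro pre parts
    rw [PySem.List.enumerate_cons, List.foldl_cons, List.foldl_cons]
    have hlen : ((pre.length : Int) + 1) = (((pre ++ [se]).length : Nat) : Int) := by simp
    have hm : pre ++ se :: suf = (pre ++ [se]) ++ suf := by simp
    rw [hlen, hm, ih (pre ++ [se])]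
    have hstep : pvPartsStep lines (pre ++ [se] ++ suf) parts ((pre.length : Int), se)
        = (pvRenderStep lines (parts, pre.getLast?.map Prod.snd) se).1 := by
      unfold pvPartsStep pvRenderStep
      cases hgl : pre.getLast? with
      | none =>
        have hpre : pre = [] := List.getLast?_eq_none_iff.mp hgl
        subst hpre
        simp
      | some q =>
        have hlpos : 1 ≤ pre.length := by
          cases pre with
          | nil => simp at hgl
          | cons a l => simp
        have h0 : ¬ ((pre.length : Int) = 0 ∧ se.1 > 0) := by
          intro h; omega
        have hgt : (pre.length : Int) > 0 := by exact_mod_cast hlpos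
        have hidx : (pre.length : Int) - 1 = ((pre.length - 1 : Nat) : Int) := by omega
        have hget : PySem.List.pyGet? (pre ++ [se] ++ suf) ((pre.length : Int) - 1) = some q := by
          rw [hidx, PySem.List.pyGet?_natCast, List.append_assoc,
            List.getElem?_append_left (by omega), ← List.getLast?_eq_getElem?, hgl]
        simp only [Option.map_some, if_neg h0, if_pos hgt, hget, Option.getD_some]
    have harg : (pvPartsStep lines (pre ++ [se] ++ suf) parts ((pre.length : Int), se),
        Option.map Prod.snd (pre ++ [se]).getLast?)
        = pvRenderStep lines (parts, pre.getLast?.map Prod.snd) se := by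
      rw [List.getLast?_concat, Prod.ext_iff]
      exact ⟨hstep, rfl⟩
    rw [harg]

-- ===== VERDICT (by name: the statement is the Claim_ definition above) =====
-- push an `if` through a trailing append
lemma pv_if_append (c : Prop) [Decidable c] (p : List String) (m : String) :
    (if c then p ++ [m] else p) = p ++ (if c then [m] else []) := by
  split_ifs <;> simp

-- ===== VERDICT (by name: the statement is the Claim_ definition above) =====
theorem build_context_regions_py_spec : Claim_equal_build_context_regions_py := by
  intro lines hit_lines ctx _hdom hpre
  unfold Spec_build_context_regions_py
  simp only [build_context_regions_py, build_context_regions_py_alt]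
  rw [pv_sorted_rev hit_lines, List.foldl_reverse]
  cases hhs : PySem.List.sorted hit_lines id with
  | nil =>
    exfalso
    apply hpre
    have hperm := PySem.List.sorted_perm hit_lines id false
    rw [hhs] at hperm
    exact hperm.nil_eq.symm
  | cons h t =>
    have hp : (h :: t).Pairwise (· ≤ ·) := by
      have h1 := PySem.List.sorted_pairwise hit_lines id
      rw [hhs] at h1
      simpa [id] using h1
    obtain ⟨hst, hhead⟩ := pv_B_inv lines ((lines.length : Nat) : Int) ctx t h hp
    rw [hst]
    obtain ⟨mhd, M', hM⟩ : ∃ mhd M',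
        pvGo (pvIv ((lines.length : Nat) : Int) ctx h)
          (t.map (pvIv ((lines.length : Nat) : Int) ctx)) = mhd :: M' := by
      cases hM : pvGo (pvIv ((lines.length : Nat) : Int) ctx h)
          (t.map (pvIv ((lines.length : Nat) : Int) ctx)) with
      | nil => rw [hM] at hhead; exact absurd hhead (by simp)
      | cons a b => exact ⟨a, b, rfl⟩
    have hmhd : mhd = ((pvIv ((lines.length : Nat) : Int) ctx h).1,
        (pvIv ((lines.length : Nat) : Int) ctx
          (pvHmax ((lines.length : Nat) : Int) ctx h t)).2) := by
      rw [hM] at hhead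
      simpa using hhead
    -- A side: the merged list is pvGo
    have hmap : (fun ln => (max 0 (ln - ctx), min ((lines.length : Nat) : Int) (ln + ctx + 1)))
        = pvIv ((lines.length : Nat) : Int) ctx := rfl
    have hmerged : ((h :: t).map
          (fun ln => (max 0 (ln - ctx), min ((lines.length : Nat) : Int) (ln + ctx + 1)))).foldl
          pvMergeStep []
        = mhd :: M' := by
      rw [hmap, List.map_cons, List.foldl_cons,
        show pvMergeStep [] (pvIv ((lines.length : Nat) : Int) ctx h)
          = [] ++ [pvIv ((lines.length : Nat) : Int) ctx h] from by simp [pvMergeStep],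
        pv_foldA, List.nil_append, hM]
    rw [hmerged]
    -- A side: parts loop = render fold = document parts
    have hparts := pv_parts_eq lines (mhd :: M') [] []
    simp only [List.nil_append, List.length_nil, Nat.cast_zero, List.getLast?_nil,
      Option.map_none] at hparts
    rw [hparts, List.foldl_cons,
      show pvRenderStep lines ([], none) mhd
        = ((if mhd.1 > 0 then [pvMsg 1 mhd.1] else []) ++ [pvBody lines mhd], some mhd.2)
        from by simp [pvRenderStep, pvBody]]
    -- A side: the trailing message via merged[-1]
    obtain ⟨g, hg, hge⟩ := pv_getLast_end M' mhd
    rw [PySem.List.pyGet?_neg_one, hg]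
    dsimp only
    rw [hge, pv_if_append,
      pv_render_doc lines ((lines.length : Nat) : Int) M'
        ((if mhd.1 > 0 then [pvMsg 1 mhd.1] else []) ++ [pvBody lines mhd]) mhd.2]
    -- B side: reduce the match, rewrite the final flush, and compare the document lists
    rw [hM]
    simp only [List.tail_cons]
    rw [show pvFlush lines ((lines.length : Nat) : Int) ctx
        ((pvDocFrom lines ((lines.length : Nat) : Int) M').reverse) (M'.head?.map Prod.fst) h
        (pvHmax ((lines.length : Nat) : Int) ctx h t)
      = ((pvDocFrom lines ((lines.length : Nat) : Int) (mhd :: M')).reverse, mhd.1) from by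
        rw [pv_flush_doc lines ((lines.length : Nat) : Int) ctx M' h
          (pvHmax ((lines.length : Nat) : Int) ctx h t), hmhd]
        simp [pvIv]]
    by_cases hh : mhd.1 > 0 <;>
      simp [hh, pvDocFrom, List.reverse_append]
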